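-- pv_equiv track=rewrite | github.com/jmzhao/pbos | nshortest.py | nshortest
-- ===== SOURCE A (Python) =====
-- import heapq
-- import operator
--
-- def nshortest(adjmat, n):
--     """N shortest paths given a DAG as adjacency matrix, assuming (i, j) for all i < j.
--
--     Returns:
--         A list of (score, path), sorted by score. Path is a tuple of node ids.
--
--     Examples:
--     >>> adj = [[0, 1, 1], [0, 0, 1], [0, 0, 0]]
--     >>> nshortest(adj, 2)
--     [(1, (0, 2)), (2, (0, 1, 2))]
--     """
--     candss = [[(0, (0, ))]]
--     for j in range(1, len(adjmat)):
--         cands = []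
--         for i in range(j):
--             for icand in candss[i]:
--                 iscore, ipath = icand
--                 score = iscore + adjmat[i][j]
--                 path = ipath + (j, )
--                 cand = score, path
--                 cands.append(cand)
--         candss.append(heapq.nsmallest(n, cands, key=operator.itemgetter(0)))
--     return candss[-1]
-- ===== SOURCE B (Python) =====
-- def _merge(xs, ys):
--     """Stable linear merge of two score-sorted candidate lists (left wins ties)."""
--     res = []
--     a = b = 0
--     while a < len(xs) and b < len(ys):
--         if ys[b][0] < xs[a][0]:
--             res.append(ys[b]); b += 1
--         else:
--             res.append(xs[a]); a += 1
--     res.extend(xs[a:])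
--     res.extend(ys[b:])
--     return res
--
-- def nshortest(adjmat, n):
--     """N shortest paths via bounded merging of the predecessors' already-sorted
--     candidate lists (no sorting): each node keeps at most n candidates, obtained
--     by linearly merging each predecessor's shifted list into the running buffer."""
--     cap = n if n > 0 else 0
--     candss = [[(0, (0,))]]
--     for j in range(1, len(adjmat)):
--         acc = []
--         for i in range(j):
--             block = [(s + adjmat[i][j], p + (j,)) for (s, p) in candss[i]]
--             acc = _merge(acc, block)[:cap]
--         candss.append(acc)
--     return candss[-1]
-- ===== Notes on version B (the rewrite author's own statement) =====
-- stated objective: faster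
-- what changed: Per node, A concatenates all predecessors' candidates and sorts the whole pool before slicing the n best; B never sorts: it linearly merges each predecessor's already-sorted candidate list into a buffer capped at n (two-pointer stable merge, left-wins ties).
import Mathlib
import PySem

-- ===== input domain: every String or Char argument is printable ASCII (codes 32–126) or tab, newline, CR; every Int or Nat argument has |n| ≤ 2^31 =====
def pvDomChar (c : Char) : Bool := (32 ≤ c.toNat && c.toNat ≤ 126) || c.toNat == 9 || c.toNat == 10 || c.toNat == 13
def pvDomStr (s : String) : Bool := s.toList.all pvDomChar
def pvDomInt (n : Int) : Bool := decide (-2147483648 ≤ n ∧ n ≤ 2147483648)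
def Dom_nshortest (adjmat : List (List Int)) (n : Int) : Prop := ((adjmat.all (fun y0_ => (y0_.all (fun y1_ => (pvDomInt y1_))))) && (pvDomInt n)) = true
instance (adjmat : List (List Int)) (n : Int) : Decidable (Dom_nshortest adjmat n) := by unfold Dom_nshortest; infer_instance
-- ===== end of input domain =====

-- B replaces A's per-node "collect all predecessor candidates, sort, slice" with bounded
-- linear merging of the predecessors' already-sorted candidate lists (objective: faster).

-- ===== PORT A =====
-- heapq.nsmallest(n, cands, key=operator.itemgetter(0)) is ported as
-- (sorted(cands, key)).take n.toNat — exact: nsmallest is documented equivalent to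
-- sorted(iterable, key=key)[:n], and it returns [] for n ≤ 0 (= take of toNat's clamp).
-- adjmat[i][j] is pyGetD with default 0: exact on Pre_ (indices in range there).
def nshortest (adjmat : List (List Int)) (n : Int) : List (Int × List Int) :=
  PySem.List.pyGetD
    ((PySem.List.pyRange 1 (adjmat.length : Int) 1).foldl
      (fun candss j =>
        candss ++
          [(PySem.List.sorted
              ((PySem.List.pyRange 0 j 1).foldl
                (fun cands i =>
                  (PySem.List.pyGetD candss i []).foldl
                    (fun cands icand =>
                      cands ++ [(icand.1 + PySem.List.pyGetD (PySem.List.pyGetD adjmat i []) j 0,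
                                 icand.2 ++ [j])])
                    cands)
                [])
              (fun c => c.1) false).take n.toNat])
      [[((0 : Int), [(0 : Int)])]])
    (-1) []

-- ===== PORT B =====
-- _merge from Source B: the while-loop two-pointer merge over the suffixes xs[a:], ys[b:],
-- ported as structural recursion on those suffixes (exact: same comparisons, same order).
def pvMerge : List (Int × List Int) → List (Int × List Int) → List (Int × List Int)
  | [], ys => ys
  | x :: xs, [] => x :: xs
  | x :: xs, y :: ys =>
      if y.1 < x.1 then y :: pvMerge (x :: xs) ys else x :: pvMerge xs (y :: ys)
termination_by xs ys => xs.length + ys.length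

-- acc[:cap] with cap = (n if n > 0 else 0) ≥ 0 is List.take (exact for nonneg bounds).
def nshortest_alt (adjmat : List (List Int)) (n : Int) : List (Int × List Int) :=
  PySem.List.pyGetD
    ((PySem.List.pyRange 1 (adjmat.length : Int) 1).foldl
      (fun candss j =>
        candss ++
          [(PySem.List.pyRange 0 j 1).foldl
              (fun acc i =>
                (pvMerge acc
                    ((PySem.List.pyGetD candss i []).map
                      (fun c => (c.1 + PySem.List.pyGetD (PySem.List.pyGetD adjmat i []) j 0,
                                 c.2 ++ [j])))).take
                  (if 0 < n then n else 0).toNat)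
              []])
      [[((0 : Int), [(0 : Int)])]])
    (-1) []

-- ===== PRECONDITION & SPEC =====
-- Pre_ excludes exactly the inputs where A raises IndexError: adjmat[i][j] is read for the
-- rows i whose candidate list is nonempty — every non-last row when n ≥ 1, only row 0 when
-- n ≤ 0 (the pruned lists are then empty) — and raises iff such a row is shorter than adjmat.
def Pre_nshortest (adjmat : List (List Int)) (n : Int) : Prop :=
  if 1 ≤ n then ∀ row ∈ adjmat.dropLast, adjmat.length ≤ row.length
  else 2 ≤ adjmat.length → adjmat.length ≤ (adjmat.headD []).length
instance (adjmat : List (List Int)) (n : Int) : Decidable (Pre_nshortest adjmat n) := by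
  unfold Pre_nshortest; infer_instance

def pvWitness_nshortest : List (List Int) × Int := ([[0, 1, 1], [0, 0, 1], [0, 0, 0]], 2)

def Spec_nshortest (adjmat : List (List Int)) (n : Int) (out : List (Int × List Int)) : Prop :=
  out = nshortest_alt adjmat n
instance (adjmat : List (List Int)) (n : Int) (out : List (Int × List Int)) :
    Decidable (Spec_nshortest adjmat n out) := by unfold Spec_nshortest; infer_instance

-- ===== CLAIM (what is proved, stated in full; the proofs are below) =====
def Claim_equal_nshortest : Prop :=
  ∀ (adjmat : List (List Int)) (n : Int), Dom_nshortest adjmat n → Pre_nshortest adjmat n →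
    Spec_nshortest adjmat n (nshortest adjmat n)

-- ===== LEMMAS AND PROOFS =====

lemma pvMerge_nil_right (a : List (Int × List Int)) : pvMerge a [] = a := by
  cases a <;> simp [pvMerge]

lemma pvMerge_cons_left (x : Int × List Int) (t bs : List (Int × List Int))
    (h : ∀ z ∈ bs, ¬ z.1 < x.1) : pvMerge (x :: t) bs = x :: pvMerge t bs := by
  cases bs with
  | nil => simp [pvMerge_nil_right]
  | cons z bs' =>
    have hz := h z (by simp)
    simp [pvMerge, hz]

lemma pw_insertBy (y : Int × List Int) (a : List (Int × List Int))
    (h : a.Pairwise (fun p q => p.1 ≤ q.1)) :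
    (PySem.List.insertBy (fun p q => decide (p.1 < q.1)) y a).Pairwise
      (fun p q => p.1 ≤ q.1) := by
  induction a with
  | nil => simp [PySem.List.insertBy]
  | cons x as ih =>
    rcases List.pairwise_cons.mp h with ⟨hx, has⟩
    by_cases hxy : y.1 < x.1
    · rw [show PySem.List.insertBy (fun p q => decide (p.1 < q.1)) y (x :: as) =
          y :: x :: as from by simp [PySem.List.insertBy, hxy]]
      refine List.pairwise_cons.mpr ⟨?_, h⟩
      intro q hq
      rcases List.mem_cons.mp hq with hq | hq
      · subst hq; omega
      · have := hx q hq; omega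
    · rw [show PySem.List.insertBy (fun p q => decide (p.1 < q.1)) y (x :: as) =
          x :: PySem.List.insertBy (fun p q => decide (p.1 < q.1)) y as from by
        simp [PySem.List.insertBy, hxy]]
      refine List.pairwise_cons.mpr ⟨?_, ih has⟩
      intro q hq
      rcases (PySem.List.mem_insertBy _ _ _ _).mp hq with hq | hq
      · subst hq; omega
      · exact hx q hq

lemma pvMerge_insertBy (y : Int × List Int) (bs : List (Int × List Int))
    (hbs : ∀ z ∈ bs, y.1 ≤ z.1) :
    ∀ a : List (Int × List Int), a.Pairwise (fun p q => p.1 ≤ q.1) →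
      pvMerge (PySem.List.insertBy (fun p q => decide (p.1 < q.1)) y a) bs =
        pvMerge a (y :: bs) := by
  intro a
  induction a with
  | nil =>
    intro _
    have : pvMerge [y] bs = y :: pvMerge [] bs :=
      pvMerge_cons_left y [] bs (fun z hz => by have := hbs z hz; omega)
    simp [PySem.List.insertBy, this, pvMerge]
  | cons x as ih =>
    intro h
    rcases List.pairwise_cons.mp h with ⟨hx, has⟩
    by_cases hyx : y.1 < x.1
    · rw [show PySem.List.insertBy (fun p q => decide (p.1 < q.1)) y (x :: as) =
          y :: x :: as from by simp [PySem.List.insertBy, hyx]]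
      rw [pvMerge_cons_left y (x :: as) bs (fun z hz => by have := hbs z hz; omega)]
      simp [pvMerge, hyx]
    · rw [show PySem.List.insertBy (fun p q => decide (p.1 < q.1)) y (x :: as) =
          x :: PySem.List.insertBy (fun p q => decide (p.1 < q.1)) y as from by
        simp [PySem.List.insertBy, hyx]]
      rw [pvMerge_cons_left x _ bs
        (fun z hz => by have h1 := hbs z hz; omega)]
      rw [ih has]
      simp [pvMerge, hyx]

lemma foldl_insertBy_eq_pvMerge :
    ∀ (b a : List (Int × List Int)), a.Pairwise (fun p q => p.1 ≤ q.1) →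
      b.Pairwise (fun p q => p.1 ≤ q.1) →
      b.foldl (fun acc x => PySem.List.insertBy (fun p q => decide (p.1 < q.1)) x acc) a =
        pvMerge a b := by
  intro b
  induction b with
  | nil => intro a ha _; simp [pvMerge_nil_right]
  | cons y bs ih =>
    intro a ha hb
    rcases List.pairwise_cons.mp hb with ⟨hy, hbs⟩
    rw [List.foldl_cons, ih _ (pw_insertBy y a ha) hbs, pvMerge_insertBy y bs hy a ha]

lemma sorted_append_eq_pvMerge (l b : List (Int × List Int))
    (hb : b.Pairwise (fun p q => p.1 ≤ q.1)) :
    PySem.List.sorted (l ++ b) (fun c => c.1) false =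
      pvMerge (PySem.List.sorted l (fun c => c.1) false) b := by
  rw [PySem.List.sorted_eq_foldl_insertBy, List.foldl_append,
    ← PySem.List.sorted_eq_foldl_insertBy]
  exact foldl_insertBy_eq_pvMerge b _ (PySem.List.sorted_pairwise l (fun c => c.1)) hb

lemma take_pvMerge :
    ∀ (a b : List (Int × List Int)) (k m : Nat), k ≤ m →
      (pvMerge (a.take m) b).take k = (pvMerge a b).take k := by
  intro a
  induction a with
  | nil => simp
  | cons x as iha =>
    intro b
    induction b with
    | nil =>
      intro k m hk
      rw [pvMerge_nil_right, pvMerge_nil_right, List.take_take, Nat.min_eq_left hk]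
    | cons y bs ihb =>
      intro k m hk
      cases k with
      | zero => simp
      | succ k' =>
        cases m with
        | zero => omega
        | succ m' =>
          rw [List.take_succ_cons]
          by_cases hyx : y.1 < x.1
          · simp only [pvMerge, hyx, if_true, List.take_succ_cons]
            rw [show x :: List.take m' as = List.take (m' + 1) (x :: as) from
              List.take_succ_cons.symm]
            rw [ihb k' (m' + 1) (by omega)]
          · simp only [pvMerge, hyx, if_false, List.take_succ_cons]
            rw [iha (y :: bs) k' m' (by omega)]

lemma foldl_pvMerge_take_eq (block : Int → List (Int × List Int)) (k : Nat) :
    ∀ R : List Int, (∀ i ∈ R, (block i).Pairwise (fun p q => p.1 ≤ q.1)) →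
      R.foldl (fun acc i => (pvMerge acc (block i)).take k) [] =
        (PySem.List.sorted (R.flatMap block) (fun c => c.1) false).take k := by
  intro R
  induction R using List.reverseRecOn with
  | nil => simp [PySem.List.sorted]
  | append_singleton R i0 ih =>
    intro h
    have hR : ∀ i ∈ R, (block i).Pairwise (fun p q => p.1 ≤ q.1) :=
      fun i hi => h i (by simp [hi])
    have hi0 : (block i0).Pairwise (fun p q => p.1 ≤ q.1) := h i0 (by simp)
    rw [List.foldl_append, List.foldl_cons, List.foldl_nil, ih hR]
    rw [take_pvMerge _ _ k k le_rfl]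
    rw [← sorted_append_eq_pvMerge _ _ hi0]
    simp

lemma block_pairwise (candss : List (List (Int × List Int)))
    (h : ∀ l ∈ candss, l.Pairwise (fun p q => p.1 ≤ q.1)) (i : Int) (w : Int) (j : Int) :
    ((PySem.List.pyGetD candss i []).map (fun c => (c.1 + w, c.2 ++ [j]))).Pairwise
      (fun p q => p.1 ≤ q.1) := by
  have hpw : (PySem.List.pyGetD candss i []).Pairwise (fun p q => p.1 ≤ q.1) := by
    cases hg : PySem.List.pyGet? candss i with
    | none => simp [PySem.List.pyGetD, hg]
    | some l =>
      have hm := PySem.List.mem_of_pyGet?_eq_some candss hg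
      simpa [PySem.List.pyGetD, hg] using h l hm
  rw [List.pairwise_map]
  exact hpw.imp (by intro p q hpq; simpa using by omega)

lemma step_eq (adjmat : List (List Int)) (n : Int) (j : Int)
    (candss : List (List (Int × List Int)))
    (h : ∀ l ∈ candss, l.Pairwise (fun p q => p.1 ≤ q.1)) :
    (PySem.List.sorted
        ((PySem.List.pyRange 0 j 1).foldl
          (fun cands i =>
            (PySem.List.pyGetD candss i []).foldl
              (fun cands icand =>
                cands ++ [(icand.1 + PySem.List.pyGetD (PySem.List.pyGetD adjmat i []) j 0,
                           icand.2 ++ [j])])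
              cands)
          [])
        (fun c => c.1) false).take n.toNat =
      (PySem.List.pyRange 0 j 1).foldl
        (fun acc i =>
          (pvMerge acc
              ((PySem.List.pyGetD candss i []).map
                (fun c => (c.1 + PySem.List.pyGetD (PySem.List.pyGetD adjmat i []) j 0,
                           c.2 ++ [j])))).take
            (if 0 < n then n else 0).toNat)
        [] := by
  have hcap : (if 0 < n then n else 0).toNat = n.toNat := by split <;> omega
  rw [hcap]
  simp only [PySem.List.foldl_append_singleton_eq_map]
  simp only [PySem.List.foldl_append_eq_flatMap]
  rw [List.nil_append]
  exact (foldl_pvMerge_take_eq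
    (fun i => (PySem.List.pyGetD candss i []).map
      (fun c => (c.1 + PySem.List.pyGetD (PySem.List.pyGetD adjmat i []) j 0, c.2 ++ [j])))
    n.toNat (PySem.List.pyRange 0 j 1)
    (fun i _ => block_pairwise candss h i _ j)).symm

lemma fold_eq (adjmat : List (List Int)) (n : Int) :
    ∀ (R : List Int) (C0 : List (List (Int × List Int))),
      (∀ l ∈ C0, l.Pairwise (fun p q => p.1 ≤ q.1)) →
      R.foldl
        (fun candss j =>
          candss ++
            [(PySem.List.sorted
                ((PySem.List.pyRange 0 j 1).foldl
                  (fun cands i =>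
                    (PySem.List.pyGetD candss i []).foldl
                      (fun cands icand =>
                        cands ++ [(icand.1 + PySem.List.pyGetD (PySem.List.pyGetD adjmat i []) j 0,
                                   icand.2 ++ [j])])
                      cands)
                  [])
                (fun c => c.1) false).take n.toNat])
        C0 =
      R.foldl
        (fun candss j =>
          candss ++
            [(PySem.List.pyRange 0 j 1).foldl
                (fun acc i =>
                  (pvMerge acc
                      ((PySem.List.pyGetD candss i []).map
                        (fun c => (c.1 + PySem.List.pyGetD (PySem.List.pyGetD adjmat i []) j 0,
                                   c.2 ++ [j])))).take
                    (if 0 < n then n else 0).toNat)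
                []])
        C0 := by
  intro R
  induction R with
  | nil => intro C0 _; rfl
  | cons j R ih =>
    intro C0 h
    rw [List.foldl_cons, List.foldl_cons]
    rw [← step_eq adjmat n j C0 h]
    apply ih
    intro l hl
    rcases List.mem_append.mp hl with hl | hl
    · exact h l hl
    · rw [List.mem_singleton.mp hl]
      exact (PySem.List.sorted_pairwise _ _).sublist (List.take_sublist _ _)

-- ===== VERDICT (by name: the statement is the Claim_ definition above) =====
theorem nshortest_spec : Claim_equal_nshortest := by
  intro adjmat n _ _
  unfold Spec_nshortest nshortest nshortest_alt
  rw [fold_eq adjmat n (PySem.List.pyRange 1 (adjmat.length : Int) 1)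
    [[((0 : Int), [(0 : Int)])]] (by simp)]
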